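-- pv_equiv track=rewrite | github.com/wis-janusz/training | src/hackerrank_problems.py | flip_matrix_with_flatten
-- ===== SOURCE A (Python) =====
-- def flip_matrix_with_flatten(arr):
--
--     n = len(arr)//2
--
--     ul_quad = [row[:n] for row in arr[:n]]
--     ur_quad = [row[n:] for row in arr[:n]]
--     ll_quad = [row[:n] for row in arr[n:]]
--     lr_quad = [row[n:] for row in arr[n:]]
--
--     ur_quad = [list(reversed(row)) for row in ur_quad]
--     ll_quad = reversed(ll_quad)
--     lr_quad = [list(reversed(row)) for row in list(reversed(lr_quad))]
--
--     ul_quad = [number for row in ul_quad for number in row]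
--     ur_quad = [number for row in ur_quad for number in row]
--     ll_quad = [number for row in ll_quad for number in row]
--     lr_quad = [number for row in lr_quad for number in row]
--
--     return sum(map(max, zip(ul_quad, ur_quad, ll_quad, lr_quad)))
-- ===== SOURCE B (Python) =====
-- def flip_matrix_with_flatten(arr):
--     n = len(arr) // 2
--     ul, ur, ll, lr = [], [], [], []
--     for i, row in enumerate(arr):
--         top = row[:n]
--         bottom = list(reversed(row[n:]))
--         if i < n:
--             ul += top
--             ur += bottom
--         else:
--             ll = top + ll
--             lr = bottom + lr
--     total = 0
--     for quad in zip(ul, ur, ll, lr):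
--         total += max(quad)
--     return total
-- ===== Notes on version B (the rewrite author's own statement) =====
-- stated objective: alternative
-- what changed: B replaces A's slice-the-matrix / reverse-lists / flatten-four-quadrants pipeline by a single pass over enumerate(arr) that grows the four streams incrementally (appending for the top half, prepending for the bottom half), followed by one explicit accumulation loop over the zipped streams instead of sum(map(max, zip(...))).
import Mathlib
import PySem

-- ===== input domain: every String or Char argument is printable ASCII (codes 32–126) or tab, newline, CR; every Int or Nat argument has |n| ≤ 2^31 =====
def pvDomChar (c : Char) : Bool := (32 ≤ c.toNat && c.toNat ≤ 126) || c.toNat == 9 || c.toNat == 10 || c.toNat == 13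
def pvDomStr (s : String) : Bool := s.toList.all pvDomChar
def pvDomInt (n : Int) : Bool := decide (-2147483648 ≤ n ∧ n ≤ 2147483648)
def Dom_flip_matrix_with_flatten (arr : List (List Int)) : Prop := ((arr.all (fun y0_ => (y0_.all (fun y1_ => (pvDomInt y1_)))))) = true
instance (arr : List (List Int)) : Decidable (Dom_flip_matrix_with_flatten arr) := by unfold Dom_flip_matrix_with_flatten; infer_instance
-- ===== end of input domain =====

-- One honest line: B builds the four mirrored streams in a single pass over enumerate(arr)
-- (append for the top half, prepend for the bottom half) and accumulates the maxima in one
-- explicit loop, instead of A's slice/reverse/flatten/zip pipeline (objective: alternative).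

-- ===== PORT A =====
def flip_matrix_with_flatten (arr : List (List Int)) : Int :=
  let n : Int := PySem.Int.floordiv (arr.length : Int) 2
  let ul_quad := (PySem.List.slice arr none (some n)).map (fun row => PySem.List.slice row none (some n))
  let ur_quad := (PySem.List.slice arr none (some n)).map (fun row => PySem.List.slice row (some n) none)
  let ll_quad := (PySem.List.slice arr (some n) none).map (fun row => PySem.List.slice row none (some n))
  let lr_quad := (PySem.List.slice arr (some n) none).map (fun row => PySem.List.slice row (some n) none)
  let ur_quad := ur_quad.map (fun row => row.reverse)
  let ll_quad := ll_quad.reverse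
  let lr_quad := (lr_quad.reverse).map (fun row => row.reverse)
  let ul := ul_quad.flatMap (fun row => row)
  let ur := ur_quad.flatMap (fun row => row)
  let ll := ll_quad.flatMap (fun row => row)
  let lr := lr_quad.flatMap (fun row => row)
  ((ul.zip (ur.zip (ll.zip lr))).map
    (fun p => max (max (max p.1 p.2.1) p.2.2.1) p.2.2.2)).sum

-- ===== PORT B =====
def flip_matrix_with_flatten_alt (arr : List (List Int)) : Int :=
  let n : Int := PySem.Int.floordiv (arr.length : Int) 2
  let st := (PySem.List.enumerate arr).foldl
    (fun (st : List Int × List Int × List Int × List Int) p =>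
      let top := PySem.List.slice p.2 none (some n)
      let bottom := (PySem.List.slice p.2 (some n) none).reverse
      if p.1 < n then (st.1 ++ top, st.2.1 ++ bottom, st.2.2.1, st.2.2.2)
      else (st.1, st.2.1, top ++ st.2.2.1, bottom ++ st.2.2.2))
    ([], [], [], [])
  (st.1.zip (st.2.1.zip (st.2.2.1.zip st.2.2.2))).foldl
    (fun total q => total + max (max (max q.1 q.2.1) q.2.2.1) q.2.2.2) 0

-- ===== PRECONDITION & SPEC =====
def Spec_flip_matrix_with_flatten (arr : List (List Int)) (out : Int) : Prop := out = flip_matrix_with_flatten_alt arr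
instance (arr : List (List Int)) (out : Int) : Decidable (Spec_flip_matrix_with_flatten arr out) := by unfold Spec_flip_matrix_with_flatten; infer_instance

-- ===== CLAIM (what is proved, stated in full; the proofs are below) =====
def Claim_equal_flip_matrix_with_flatten : Prop := ∀ (arr : List (List Int)), Dom_flip_matrix_with_flatten arr → Spec_flip_matrix_with_flatten arr (flip_matrix_with_flatten arr)

-- ===== LEMMAS AND PROOFS =====

-- B's loop over the top half only appends to the first two streams
theorem pv_top_phase (nn : Nat) (rows : List (List Int)) (s : Int) (h0 : 0 ≤ s)
    (h : s + rows.length ≤ (nn : Int)) (ul ur ll lr : List Int) :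
    (PySem.List.enumerate rows s).foldl
      (fun (st : List Int × List Int × List Int × List Int) p =>
        if p.1 < (nn : Int) then
          (st.1 ++ p.2.take nn, st.2.1 ++ (p.2.drop nn).reverse, st.2.2.1, st.2.2.2)
        else (st.1, st.2.1, p.2.take nn ++ st.2.2.1, (p.2.drop nn).reverse ++ st.2.2.2))
      (ul, ur, ll, lr)
    = (ul ++ rows.flatMap (fun r => r.take nn),
       ur ++ rows.flatMap (fun r => (r.drop nn).reverse), ll, lr) := by
  induction rows generalizing s ul ur with
  | nil => simp [PySem.List.enumerate]
  | cons r t ih =>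
    rw [PySem.List.enumerate_cons, List.foldl_cons]
    simp only [List.length_cons] at h
    rw [if_pos (by push_cast at h ⊢; omega)]
    rw [ih (s + 1) (by omega) (by push_cast at h ⊢; omega)]
    simp [List.append_assoc]

-- B's loop over the bottom half only prepends to the last two streams
theorem pv_bot_phase (nn : Nat) (rows : List (List Int)) (s : Int)
    (h : (nn : Int) ≤ s) (ul ur ll lr : List Int) :
    (PySem.List.enumerate rows s).foldl
      (fun (st : List Int × List Int × List Int × List Int) p =>
        if p.1 < (nn : Int) then
          (st.1 ++ p.2.take nn, st.2.1 ++ (p.2.drop nn).reverse, st.2.2.1, st.2.2.2)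
        else (st.1, st.2.1, p.2.take nn ++ st.2.2.1, (p.2.drop nn).reverse ++ st.2.2.2))
      (ul, ur, ll, lr)
    = (ul, ur, rows.reverse.flatMap (fun r => r.take nn) ++ ll,
       rows.reverse.flatMap (fun r => (r.drop nn).reverse) ++ lr) := by
  induction rows generalizing s ll lr with
  | nil => simp [PySem.List.enumerate]
  | cons r t ih =>
    rw [PySem.List.enumerate_cons, List.foldl_cons]
    rw [if_neg (by omega)]
    rw [ih (s + 1) (by omega)]
    simp [List.flatMap_append, List.append_assoc]

-- ===== VERDICT (by name: the statement is the Claim_ definition above) =====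
theorem flip_matrix_with_flatten_spec : Claim_equal_flip_matrix_with_flatten := by
  intro arr _
  unfold Spec_flip_matrix_with_flatten
  have hn : PySem.Int.floordiv (arr.length : Int) 2 = ((arr.length / 2 : Nat) : Int) := by
    exact_mod_cast PySem.Int.floordiv_natCast arr.length 2
  set nn : Nat := arr.length / 2 with hnn
  have hsplit : PySem.List.enumerate arr 0
      = PySem.List.enumerate (arr.take nn) 0 ++ PySem.List.enumerate (arr.drop nn) (nn : Int) := by
    conv_lhs => rw [← List.take_append_drop nn arr]
    rw [PySem.List.enumerate_append]
    congr 1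
    simp [List.length_take]
    congr 1
    omega
  simp only [flip_matrix_with_flatten, flip_matrix_with_flatten_alt, hn,
    PySem.List.slice_to_natCast, PySem.List.slice_from_natCast,
    ← List.map_reverse, List.map_map, List.flatMap_map, Function.comp,
    hsplit, List.foldl_append]
  rw [pv_top_phase nn (arr.take nn) 0 (by omega) (by simp),
      pv_bot_phase nn (arr.drop nn) (nn : Int) (by omega)]
  simp only [List.nil_append, List.append_nil]
  rw [PySem.List.foldl_add]
  simp
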